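-- pv_equiv track=rewrite | github.com/Juanma1023/films_project | codigo_python/ETL/transformar_data.py | limpiarCampoNumericoDecimal
-- ===== SOURCE A (Python) =====
-- def limpiarCampoNumericoDecimal(cadena):
--     # Limpia la cadena para dejar solo caracteres numéricos y un solo punto decimal
--     encontrado_punto = False
--     numeros = []
--
--     for caracter in cadena:
--         # Si es un dígito, lo agregamos
--         if caracter.isdigit():
--             numeros.append(caracter)
--         # Si es un punto y aún no hemos encontrado otro, lo agregamos
--         elif caracter == '.' and not encontrado_punto:
--             numeros.append(caracter)
--             encontrado_punto = True
--
--     # Unir la lista de caracteres en una cadena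
--     return ''.join(numeros)
-- ===== SOURCE B (Python) =====
-- def limpiarCampoNumericoDecimal(cadena):
--     before, sep, after = cadena.partition('.')
--     digits_before = ''.join(filter(str.isdigit, before))
--     if sep:
--         return digits_before + '.' + ''.join(filter(str.isdigit, after))
--     return digits_before
-- ===== Notes on version B (the rewrite author's own statement) =====
-- stated objective: idiomatic
-- what changed: Replaces the character loop carrying a found-dot flag by str.partition at the first decimal point plus two digit filters, concatenating before-digits, the separator if present, and after-digits.
import Mathlib
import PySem

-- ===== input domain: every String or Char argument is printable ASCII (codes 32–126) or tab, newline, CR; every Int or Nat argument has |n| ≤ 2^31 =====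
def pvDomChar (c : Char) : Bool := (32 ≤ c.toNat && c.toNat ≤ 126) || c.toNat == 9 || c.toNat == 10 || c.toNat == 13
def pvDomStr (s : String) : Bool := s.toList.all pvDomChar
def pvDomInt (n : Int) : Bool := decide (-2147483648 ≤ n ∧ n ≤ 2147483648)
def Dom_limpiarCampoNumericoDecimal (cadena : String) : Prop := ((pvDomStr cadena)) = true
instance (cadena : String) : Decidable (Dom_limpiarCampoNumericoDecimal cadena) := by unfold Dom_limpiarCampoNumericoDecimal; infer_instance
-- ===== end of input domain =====

-- B replaces A's flag-carrying loop by partition at the first '.' plus two digit filters (idiomatic).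

-- ===== PORT A =====
-- state = (encontrado_punto, numeros); one step of A's for-loop
def limpiarCampoNumericoDecimal (cadena : String) : String :=
  let st := cadena.toList.foldl
    (fun (st : Bool × List Char) caracter =>
      if PySem.Chars.isdigit caracter then (st.1, st.2 ++ [caracter])
      else if caracter = '.' ∧ st.1 = false then (true, st.2 ++ [caracter])
      else st)
    (false, [])
  String.mk st.2

-- ===== PORT B =====
-- cadena.partition('.') as takeWhile/dropWhile at the first '.'
def limpiarCampoNumericoDecimal_alt (cadena : String) : String :=
  let before := cadena.toList.takeWhile (fun c => ¬ (c = '.'))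
  let rest := cadena.toList.dropWhile (fun c => ¬ (c = '.'))
  let digitsBefore := before.filter PySem.Chars.isdigit
  match rest with
  | _ :: after => String.mk (digitsBefore ++ '.' :: after.filter PySem.Chars.isdigit)
  | [] => String.mk digitsBefore

-- ===== PRECONDITION & SPEC =====
def Spec_limpiarCampoNumericoDecimal (cadena : String) (out : String) : Prop := out = limpiarCampoNumericoDecimal_alt cadena
instance (cadena : String) (out : String) : Decidable (Spec_limpiarCampoNumericoDecimal cadena out) := by unfold Spec_limpiarCampoNumericoDecimal; infer_instance

-- ===== CLAIM (what is proved, stated in full; the proofs are below) =====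
def Claim_equal_limpiarCampoNumericoDecimal : Prop := ∀ (cadena : String), Dom_limpiarCampoNumericoDecimal cadena → Spec_limpiarCampoNumericoDecimal cadena (limpiarCampoNumericoDecimal cadena)

-- ===== LEMMAS AND PROOFS =====

def pvStep : Bool × List Char → Char → Bool × List Char :=
  fun st caracter =>
    if PySem.Chars.isdigit caracter then (st.1, st.2 ++ [caracter])
    else if caracter = '.' ∧ st.1 = false then (true, st.2 ++ [caracter])
    else st

-- once the dot has been found, the loop just appends the digits
lemma pv_foldl_true (l : List Char) (acc : List Char) :
    l.foldl pvStep (true, acc) = (true, acc ++ l.filter PySem.Chars.isdigit) := by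
  induction l generalizing acc with
  | nil => simp
  | cons c t ih =>
    simp only [List.foldl_cons, List.filter_cons, pvStep]
    by_cases hd : PySem.Chars.isdigit c
    · simp [hd, ih]
    · simp [hd, ih]

-- '.' is not a digit
lemma pv_dot_not_digit : PySem.Chars.isdigit '.' = false := by decide

-- before the dot is found: B's partition form
lemma pv_foldl_false (l : List Char) (acc : List Char) :
    l.foldl pvStep (false, acc) =
      match l.dropWhile (fun c => ¬ (c = '.')) with
      | _ :: after =>
        (true, acc ++ (l.takeWhile (fun c => ¬ (c = '.'))).filter PySem.Chars.isdigit
                   ++ '.' :: after.filter PySem.Chars.isdigit)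
      | [] => (false, acc ++ (l.takeWhile (fun c => ¬ (c = '.'))).filter PySem.Chars.isdigit) := by
  induction l generalizing acc with
  | nil => simp
  | cons c t ih =>
    by_cases hdot : c = '.'
    · subst hdot
      simp only [List.foldl_cons, pvStep, pv_dot_not_digit, Bool.false_eq_true, if_false]
      simp [List.dropWhile_cons, List.takeWhile_cons, pv_foldl_true]
    · simp only [List.foldl_cons, pvStep, List.dropWhile_cons, List.takeWhile_cons,
        hdot, decide_true, decide_false, not_false_eq_true, if_true, ite_false]
      by_cases hd : PySem.Chars.isdigit c
      · simp only [hd, if_true, ih]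
        cases h : t.dropWhile (fun c => ¬ (c = '.')) <;>
          simp [hdot, hd, List.filter_cons]
      · simp only [hd, Bool.false_eq_true, if_false, hdot, and_true, ite_false]
        simp only [ih]
        cases h : t.dropWhile (fun c => ¬ (c = '.')) <;>
          simp [hdot, hd, List.filter_cons]

-- ===== VERDICT (by name: the statement is the Claim_ definition above) =====
theorem limpiarCampoNumericoDecimal_spec : Claim_equal_limpiarCampoNumericoDecimal := by
  intro cadena _
  unfold Spec_limpiarCampoNumericoDecimal limpiarCampoNumericoDecimal limpiarCampoNumericoDecimal_alt
  show String.mk ((cadena.toList.foldl pvStep (false, [])).2) = _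
  rw [pv_foldl_false]
  cases h : cadena.toList.dropWhile (fun c => ¬ (c = '.')) <;> simp
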